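-- pv_equiv track=rewrite | github.com/amanjshah/advent-of-code-2023 | day14.py | pushUp
-- ===== SOURCE A (Python) =====
-- def pushUp(data):
--     for j in range(len(data[0])):
--         for i in range(1, len(data)):
--             if data[i][j] != "O":
--                 continue
--             pointer = i - 1
--             while pointer >= 0 and data[pointer][j] == ".":
--                 pointer -= 1
--             pointer += 1
--             data[i][j] = "."
--             data[pointer][j] = "O"
--     return data
-- ===== SOURCE B (Python) =====
-- def pushUp(data):
--     for j in range(len(data[0])):
--         free = 0
--         for i in range(len(data)):
--             c = data[i][j]
--             if c == "O":
--                 data[i][j] = "."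
--                 data[free][j] = "O"
--                 free += 1
--             elif c != ".":
--                 free = i + 1
--     return data
-- ===== Notes on version B (the rewrite author's own statement) =====
-- stated objective: simpler
-- what changed: Replaced the per-rock upward while-scan with a single downward sweep per column that tracks the next free slot index, removing the inner scan.
import Mathlib
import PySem

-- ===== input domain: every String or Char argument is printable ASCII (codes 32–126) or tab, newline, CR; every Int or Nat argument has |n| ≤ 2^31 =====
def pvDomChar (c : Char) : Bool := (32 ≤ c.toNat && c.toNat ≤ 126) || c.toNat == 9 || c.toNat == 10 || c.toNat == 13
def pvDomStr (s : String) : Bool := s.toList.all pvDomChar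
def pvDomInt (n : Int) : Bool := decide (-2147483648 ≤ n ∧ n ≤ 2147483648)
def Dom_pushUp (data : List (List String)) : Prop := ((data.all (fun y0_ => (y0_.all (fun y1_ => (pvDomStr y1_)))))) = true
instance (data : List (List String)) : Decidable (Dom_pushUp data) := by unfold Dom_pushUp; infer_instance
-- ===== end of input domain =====

-- B replaces A's per-rock upward while-scan with one downward sweep per column keeping a
-- next-free-slot index (objective: simpler). Both Pythons mutate `data` in place the same
-- way and return it; the equivalence proved here is about the returned value.

-- ===== PORT A =====
-- grid read data[i][j] (indices always in range under Pre_)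
def pvGet2 (g : List (List String)) (i j : Nat) : String := (g.getD i []).getD j ""
-- grid write data[i][j] = v (in range under Pre_; out of range it is a no-op)
def pvSet2 (g : List (List String)) (i j : Nat) (v : String) : List (List String) :=
  g.set i ((g.getD i []).set j v)

-- the `while pointer >= 0 and data[pointer][j] == "."` loop
def pvScanA (g : List (List String)) (j : Nat) (p : Int) : Int :=
  if h : 0 ≤ p ∧ pvGet2 g p.toNat j = "." then pvScanA g j (p - 1) else p
termination_by (p + 1).toNat
decreasing_by omega

-- body of A's inner `for i` loop
def pvInnerA (j : Nat) (g : List (List String)) (i : Nat) : List (List String) :=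
  if pvGet2 g i j ≠ "O" then g
  else
    let pointer : Int := pvScanA g j ((i : Int) - 1) + 1
    pvSet2 (pvSet2 g i j ".") pointer.toNat j "O"

def pushUp (data : List (List String)) : List (List String) :=
  (List.range (data.headD []).length).foldl
    (fun g j => (List.range' 1 (data.length - 1)).foldl (pvInnerA j) g) data

-- ===== PORT B =====
-- body of B's inner loop: state = (grid, next free slot index)
def pvInnerB (j : Nat) (st : List (List String) × Nat) (i : Nat) : List (List String) × Nat :=
  let c := pvGet2 st.1 i j
  if c = "O" then (pvSet2 (pvSet2 st.1 i j ".") st.2 j "O", st.2 + 1)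
  else if c ≠ "." then (st.1, i + 1)
  else st

def pushUp_alt (data : List (List String)) : List (List String) :=
  (List.range (data.headD []).length).foldl
    (fun g j => ((List.range data.length).foldl (pvInnerB j) (g, 0)).1) data

-- ===== PRECONDITION & SPEC =====
-- Pre_ excludes exactly the inputs where the Python A raises IndexError: empty `data`
-- (A evaluates data[0]) and grids with a row shorter than row 0 (A indexes every row at
-- the columns of row 0).
def Pre_pushUp (data : List (List String)) : Prop :=
  data ≠ [] ∧ ∀ r ∈ data, (data.headD []).length ≤ r.length

instance (data : List (List String)) : Decidable (Pre_pushUp data) := by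
  unfold Pre_pushUp; infer_instance

def pvWitness_pushUp : List (List String) :=
  [[".", "#"], ["O", "."], ["O", "O"]]

def Spec_pushUp (data : List (List String)) (out : List (List String)) : Prop := out = pushUp_alt data
instance (data : List (List String)) (out : List (List String)) : Decidable (Spec_pushUp data out) := by unfold Spec_pushUp; infer_instance

-- ===== CLAIM (what is proved, stated in full; the proofs are below) =====
def Claim_equal_pushUp : Prop := ∀ (data : List (List String)), Dom_pushUp data → Pre_pushUp data → Spec_pushUp data (pushUp data)

-- ===== LEMMAS AND PROOFS =====

theorem pv_length_set2 (g : List (List String)) (i j : Nat) (v : String) :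
    (pvSet2 g i j v).length = g.length := by
  simp [pvSet2]

theorem pv_rowlen_set2 (g : List (List String)) (i j : Nat) (v : String) (k : Nat) :
    ((pvSet2 g i j v).getD k []).length = (g.getD k []).length := by
  unfold pvSet2 List.getD
  by_cases hk : k = i
  · subst hk
    by_cases hi : k < g.length
    · simp [hi]
    · rw [List.set_eq_of_length_le (by omega)]
  · rw [List.getElem?_set_ne (by omega : i ≠ k)]

theorem pv_get2_set2_ne (g : List (List String)) (i j k : Nat) (v : String) (h : k ≠ i) :
    pvGet2 (pvSet2 g i j v) k j = pvGet2 g k j := by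
  unfold pvGet2 pvSet2 List.getD
  rw [List.getElem?_set_ne (by omega : i ≠ k)]

theorem pv_get2_set2_self (g : List (List String)) (i j : Nat) (v : String)
    (hi : i < g.length) (hj : j < (g.getD i []).length) :
    pvGet2 (pvSet2 g i j v) i j = v := by
  unfold pvGet2 pvSet2
  rw [List.getD_eq_getElem g [] hi] at hj
  rw [List.getD_eq_getElem _ [] (show i < (g.set i ((g.getD i []).set j v)).length by
        simpa using hi)]
  rw [List.getElem_set_self (by simpa using hi)]
  rw [List.getD_eq_getElem _ "" (by rw [List.length_set, List.getD_eq_getElem g [] hi]; exact hj)]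
  exact List.getElem_set_self _

theorem pv_set2_set2 (g : List (List String)) (i j : Nat) (v w : String) :
    pvSet2 (pvSet2 g i j v) i j w = pvSet2 g i j w := by
  unfold pvSet2 List.getD
  by_cases hi : i < g.length
  · rw [List.getElem?_set_self (by simpa using hi)]
    simp [List.set_set]
  · rw [List.set_eq_of_length_le (by simp; omega), List.set_eq_of_length_le (by omega),
        List.set_eq_of_length_le (by omega)]

theorem pv_set2_eq_self (g : List (List String)) (i j : Nat) (v : String)
    (hi : i < g.length) (hj : j < (g.getD i []).length)
    (h : pvGet2 g i j = v) : pvSet2 g i j v = g := by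
  unfold pvGet2 pvSet2 at *
  rw [List.getD_eq_getElem g [] hi] at h hj ⊢
  rw [List.getD_eq_getElem _ "" hj] at h
  rw [← h, List.set_getElem_self hj, List.set_getElem_self hi]

-- loop invariant for one column: cells free..i-1 are "." and free sits right after a non-"."
def pvInv (j : Nat) (g : List (List String)) (free i : Nat) : Prop :=
  free ≤ i ∧ (∀ k, free ≤ k → k < i → pvGet2 g k j = ".") ∧
    (free = 0 ∨ pvGet2 g (free - 1) j ≠ ".")

-- characterisation of A's while-scan under the invariant
theorem pv_scan_eq (g : List (List String)) (j free : Nat)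
    (hblock : free = 0 ∨ pvGet2 g (free - 1) j ≠ ".") :
    ∀ (n : Nat) (p : Int), (p + 1).toNat ≤ n → (free : Int) - 1 ≤ p →
      (∀ k : Nat, free ≤ k → (k : Int) ≤ p → pvGet2 g k j = ".") →
      pvScanA g j p = (free : Int) - 1 := by
  intro n
  induction n with
  | zero =>
    intro p hn hlb _
    have hp : p = -1 := by omega
    have hf : free = 0 := by omega
    subst hp
    rw [pvScanA]
    simp [hf]
  | succ m ih =>
    intro p hn hlb hdots
    rw [pvScanA]
    by_cases hge : (free : Int) ≤ p
    · have hp0 : 0 ≤ p := by omega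
      have hc : pvGet2 g p.toNat j = "." := hdots p.toNat (by omega) (by omega)
      rw [dif_pos ⟨hp0, hc⟩]
      exact ih (p - 1) (by omega) (by omega) (fun k hk1 hk2 => hdots k hk1 (by omega))
    · have hp : p = (free : Int) - 1 := by omega
      rw [dif_neg]
      · exact hp
      · rintro ⟨h0, hdot⟩
        rcases hblock with hf | hne
        · omega
        · apply hne
          have hpt : p.toNat = free - 1 := by omega
          rwa [hpt] at hdot

-- one step of A's inner loop equals one step of B's, and the invariant is maintained
theorem pv_step (j : Nat) (g : List (List String)) (free i : Nat)
    (hi : i < g.length) (hj : ∀ k, k < g.length → j < (g.getD k []).length)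
    (hinv : pvInv j g free i) :
    (pvInnerB j (g, free) i).1 = pvInnerA j g i ∧
      pvInv j (pvInnerA j g i) (pvInnerB j (g, free) i).2 (i + 1) := by
  obtain ⟨hfi, hdots, hblock⟩ := hinv
  by_cases hO : pvGet2 g i j = "O"
  · have hscan : pvScanA g j ((i : Int) - 1) = (free : Int) - 1 :=
      pv_scan_eq g j free hblock i ((i : Int) - 1) (by omega) (by omega)
        (fun k hk1 hk2 => hdots k hk1 (by omega))
    have hptr : ((pvScanA g j ((i : Int) - 1) + 1)).toNat = free := by
      rw [hscan]; omega
    have hA : pvInnerA j g i = pvSet2 (pvSet2 g i j ".") free j "O" := by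
      unfold pvInnerA
      rw [if_neg (by simp [hO])]
      simp only [hptr]
    have hB : pvInnerB j (g, free) i = (pvSet2 (pvSet2 g i j ".") free j "O", free + 1) := by
      unfold pvInnerB
      simp [hO]
    refine ⟨by rw [hA, hB], ?_⟩
    rw [hA, hB]
    refine ⟨by omega, ?_, ?_⟩
    · intro k hk1 hk2
      by_cases hki : k = i
      · subst hki
        rw [pv_get2_set2_ne _ _ _ _ _ (by omega : k ≠ free),
            pv_get2_set2_self g k j "." hi (hj k hi)]
      · rw [pv_get2_set2_ne _ _ _ _ _ (by omega : k ≠ free),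
            pv_get2_set2_ne _ _ _ _ _ (by omega : k ≠ i)]
        exact hdots k (by omega) (by omega)
    · right
      have hfl : free < (pvSet2 g i j ".").length := by rw [pv_length_set2]; omega
      have hfr : j < ((pvSet2 g i j ".").getD free []).length := by
        rw [pv_rowlen_set2]; exact hj free (by omega)
      simp only [Nat.add_sub_cancel]
      rw [pv_get2_set2_self _ _ _ _ hfl hfr]
      decide
  · have hA : pvInnerA j g i = g := by unfold pvInnerA; rw [if_pos (by simp [hO])]
    by_cases hdot : pvGet2 g i j = "."
    · have hB : pvInnerB j (g, free) i = (g, free) := by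
        unfold pvInnerB; simp [hdot]
      refine ⟨by rw [hA, hB], ?_⟩
      rw [hA, hB]
      refine ⟨by omega, ?_, hblock⟩
      intro k hk1 hk2
      by_cases hki : k = i
      · subst hki; exact hdot
      · exact hdots k hk1 (by omega)
    · have hB : pvInnerB j (g, free) i = (g, i + 1) := by
        unfold pvInnerB; simp [hO, hdot]
      refine ⟨by rw [hA, hB], ?_⟩
      rw [hA, hB]
      exact ⟨by omega, fun k hk1 hk2 => by omega, Or.inr (by simpa using hdot)⟩

-- one A-step preserves the shape of the grid
theorem pv_shape_innerA (j : Nat) (g : List (List String)) (i : Nat) :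
    (pvInnerA j g i).length = g.length ∧
      ∀ k, ((pvInnerA j g i).getD k []).length = (g.getD k []).length := by
  unfold pvInnerA
  split
  · exact ⟨rfl, fun _ => rfl⟩
  · constructor
    · rw [pv_length_set2, pv_length_set2]
    · intro k; rw [pv_rowlen_set2, pv_rowlen_set2]

-- the whole A inner loop preserves the shape of the grid
theorem pv_shape_foldA (j : Nat) (is : List Nat) : ∀ g : List (List String),
    (is.foldl (pvInnerA j) g).length = g.length ∧
      ∀ k, ((is.foldl (pvInnerA j) g).getD k []).length = (g.getD k []).length := by
  induction is with
  | nil => exact fun g => ⟨rfl, fun _ => rfl⟩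
  | cons i is ih =>
    intro g
    obtain ⟨h1, h2⟩ := pv_shape_innerA j g i
    obtain ⟨h3, h4⟩ := ih (pvInnerA j g i)
    exact ⟨by simp [List.foldl_cons]; omega, fun k => by
      simp only [List.foldl_cons]; rw [h4 k, h2 k]⟩

-- the two inner loops agree from any state satisfying the invariant
theorem pv_loop (j : Nat) : ∀ (n : Nat) (g : List (List String)) (free i : Nat),
    (∀ k, k < g.length → j < (g.getD k []).length) → i + n ≤ g.length →
    pvInv j g free i →
    ((List.range' i n).foldl (pvInnerB j) (g, free)).1
      = (List.range' i n).foldl (pvInnerA j) g := by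
  intro n
  induction n with
  | zero => intro g free i _ _ _; simp
  | succ m ih =>
    intro g free i hj hlen hinv
    rw [List.range'_succ]
    simp only [List.foldl_cons]
    obtain ⟨h1, h2⟩ := pv_step j g free i (by omega) hj hinv
    have hB : pvInnerB j (g, free) i = (pvInnerA j g i, (pvInnerB j (g, free) i).2) := by
      rw [← h1]
    rw [hB]
    obtain ⟨hlenA, hrowA⟩ := pv_shape_innerA j g i
    exact ih (pvInnerA j g i) _ (i + 1)
      (fun k hk => by rw [hrowA]; exact hj k (by omega))
      (by omega) h2

-- B's step at row 0 leaves the grid unchanged and establishes the invariant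
theorem pv_step0 (j : Nat) (g : List (List String))
    (h0 : 0 < g.length) (hj : ∀ k, k < g.length → j < (g.getD k []).length) :
    (pvInnerB j (g, 0) 0).1 = g ∧ pvInv j g (pvInnerB j (g, 0) 0).2 1 := by
  by_cases hO : pvGet2 g 0 j = "O"
  · have hB : pvInnerB j (g, 0) 0 = (pvSet2 (pvSet2 g 0 j ".") 0 j "O", 1) := by
      unfold pvInnerB; simp [hO]
    rw [hB, pv_set2_set2, pv_set2_eq_self g 0 j "O" h0 (hj 0 h0) hO]
    exact ⟨rfl, by omega, fun k hk1 hk2 => by omega,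
      Or.inr (by show pvGet2 g 0 j ≠ "."; rw [hO]; decide)⟩
  · by_cases hdot : pvGet2 g 0 j = "."
    · have hB : pvInnerB j (g, 0) 0 = (g, 0) := by unfold pvInnerB; simp [hdot]
      rw [hB]
      exact ⟨rfl, by omega, fun k hk1 hk2 => by rw [show k = 0 by omega]; exact hdot,
        Or.inl rfl⟩
    · have hB : pvInnerB j (g, 0) 0 = (g, 1) := by unfold pvInnerB; simp [hO, hdot]
      rw [hB]
      exact ⟨rfl, by omega, fun k hk1 hk2 => by omega, Or.inr (by simpa using hdot)⟩

-- one full column: B's sweep equals A's nested scan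
theorem pv_col (j : Nat) (g : List (List String))
    (hj : ∀ k, k < g.length → j < (g.getD k []).length) :
    ((List.range g.length).foldl (pvInnerB j) (g, 0)).1
      = (List.range' 1 (g.length - 1)).foldl (pvInnerA j) g := by
  rcases hg : g.length with _ | m
  · simp
  · have hr : List.range (m + 1) = 0 :: List.range' 1 m := by
      rw [List.range_eq_range', List.range'_succ]
    rw [hr, List.foldl_cons]
    obtain ⟨h1, h2⟩ := pv_step0 j g (by omega) hj
    rcases hst : pvInnerB j (g, 0) 0 with ⟨g', f'⟩
    rw [hst] at h1 h2
    obtain rfl : g' = g := h1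
    simpa using pv_loop j m _ f' 1 hj (by omega) h2

-- the outer loop over columns
theorem pv_outer (cols : Nat) : ∀ (js : List Nat) (g : List (List String)) (R : Nat),
    g.length = R → (∀ k, k < R → cols ≤ (g.getD k []).length) → (∀ j ∈ js, j < cols) →
    js.foldl (fun g j => (List.range' 1 (R - 1)).foldl (pvInnerA j) g) g
      = js.foldl (fun g j => ((List.range R).foldl (pvInnerB j) (g, 0)).1) g := by
  intro js
  induction js with
  | nil => intros; rfl
  | cons j js ih =>
    intro g R hR hrows hjs
    simp only [List.foldl_cons]
    have hj : ∀ k, k < g.length → j < (g.getD k []).length := fun k hk =>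
      lt_of_lt_of_le (hjs j (by simp)) (hrows k (by omega))
    have hcol := pv_col j g hj
    rw [hR] at hcol
    rw [hcol]
    obtain ⟨hlenA, hrowA⟩ := pv_shape_foldA j (List.range' 1 (R - 1)) g
    exact ih _ R (by rw [hlenA]; exact hR)
      (fun k hk => by rw [hrowA k]; exact hrows k hk)
      (fun j' hj' => hjs j' (by simp [hj']))

-- ===== VERDICT (by name: the statement is the Claim_ definition above) =====
theorem pushUp_spec : Claim_equal_pushUp := by
  intro data _ hpre
  obtain ⟨hne, hrows⟩ := hpre
  unfold Spec_pushUp pushUp pushUp_alt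
  apply pv_outer (data.headD []).length (List.range (data.headD []).length) data
    data.length rfl
  · intro k hk
    have hmem : data.getD k [] ∈ data := by
      unfold List.getD
      rw [List.getElem?_eq_getElem hk]
      exact List.getElem_mem hk
    exact hrows _ hmem
  · intro j hj
    exact List.mem_range.mp hj
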